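-- pv_equiv track=rewrite | github.com/jdhuntington/advent2024 | day04/problem2.py | find_middles
-- ===== SOURCE A (Python) =====
-- from math import floor
--
-- def find_middles(needle, haystack, positive_rotation):
--     other_needle = needle[::-1]
--     middles = []
--     for i in range(len(haystack)):
--         line = haystack[i]
--         for pos in range(len(line)):
--             if line.startswith(needle, pos) or line.startswith(other_needle, pos):
--                 middle = pos + floor(len(needle) / 2)
--                 if positive_rotation:
--                     middles.append((i - middle, middle))
--                 else:
--                     middles.append((i - (len(line) - middle) + 1, middle))
--     return middles
-- ===== SOURCE B (Python) =====
-- def _occurrences(pat, line):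
--     # all (overlapping) start positions of pat in line, via repeated str.find
--     res = []
--     p = line.find(pat)
--     while 0 <= p < len(line):
--         res.append(p)
--         p = line.find(pat, p + 1)
--     return res
--
--
-- def _merge(xs, ys):
--     # merge two strictly increasing lists, dropping duplicates across them
--     res = []
--     a = b = 0
--     while a < len(xs) and b < len(ys):
--         x, y = xs[a], ys[b]
--         if x < y:
--             res.append(x); a += 1
--         elif y < x:
--             res.append(y); b += 1
--         else:
--             res.append(x); a += 1; b += 1
--     res += xs[a:]
--     res += ys[b:]
--     return res
--
--
-- def find_middles(needle, haystack, positive_rotation):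
--     other = needle[::-1]
--     half = len(needle) // 2
--     out = []
--     for i, line in enumerate(haystack):
--         w = len(line)
--         positions = _merge(_occurrences(needle, line), _occurrences(other, line))
--         if positive_rotation:
--             out += [(i - (p + half), p + half) for p in positions]
--         else:
--             out += [(i - (w - (p + half)) + 1, p + half) for p in positions]
--     return out
-- ===== Notes on version B (the rewrite author's own statement) =====
-- stated objective: alternative
-- what changed: Instead of testing startswith at every position of every line, B lists the occurrence positions of the needle and of its reverse with repeated str.find and merges the two strictly increasing position lists with a two-pointer dedup merge.
import Mathlib
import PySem

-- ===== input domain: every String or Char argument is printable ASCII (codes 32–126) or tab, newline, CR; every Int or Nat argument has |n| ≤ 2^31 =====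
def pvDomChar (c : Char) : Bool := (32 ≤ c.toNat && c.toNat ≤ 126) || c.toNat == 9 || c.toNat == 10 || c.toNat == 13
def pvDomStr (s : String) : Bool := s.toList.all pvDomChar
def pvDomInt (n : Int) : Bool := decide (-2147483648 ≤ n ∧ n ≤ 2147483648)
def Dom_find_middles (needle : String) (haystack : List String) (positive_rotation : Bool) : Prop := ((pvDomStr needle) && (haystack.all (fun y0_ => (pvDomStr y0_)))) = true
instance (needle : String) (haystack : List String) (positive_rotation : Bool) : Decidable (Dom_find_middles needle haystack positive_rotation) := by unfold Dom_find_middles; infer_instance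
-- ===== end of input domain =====

-- B replaces A's per-position startswith scan by listing the occurrences of the needle and of its
-- reverse via repeated find, then merging the two increasing position lists (alternative algorithm).

-- ===== PORT A =====
-- line.startswith(needle, pos) with 0 ≤ pos < len(line): needle is a prefix of line[pos:]
def startswithAt (l pat : List Char) (pos : Nat) : Bool := PySem.Chars.startswith (l.drop pos) pat

def find_middles (needle : String) (haystack : List String) (positive_rotation : Bool) : List (Int × Int) :=
  let nd := needle.toList
  let other := nd.reverse          -- needle[::-1]
  (List.range haystack.length).foldl (fun middles i =>
    let l := (haystack.getD i "").toList    -- haystack[i], i in range(len(haystack))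
    (List.range l.length).foldl (fun acc pos =>
      if startswithAt l nd pos || startswithAt l other pos then
        -- middle = pos + floor(len(needle) / 2)
        let middle : Int := (pos : Int) + ((nd.length / 2 : Nat) : Int)
        if positive_rotation then acc ++ [((i : Int) - middle, middle)]
        else acc ++ [((i : Int) - ((l.length : Int) - middle) + 1, middle)]
      else acc) middles) []

-- ===== PORT B =====
-- _occurrences: repeated line.find(pat, p+1); the guard's `k ≤ line.length` only records that the
-- scan start never passes the end (true on every call chain) and makes termination evident.
def occFrom (pat line : List Char) (k : Nat) : List Nat :=
  let p := PySem.Chars.findFrom line pat (k : Int) none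
  if h : k ≤ line.length ∧ 0 ≤ p ∧ p.toNat < line.length then
    p.toNat :: occFrom pat line (p.toNat + 1)
  else []
termination_by line.length - k
decreasing_by
  have hs := PySem.Chars.findFrom_natCast_spec line pat k h.1 (by omega)
  omega

-- _merge: two-pointer merge of two strictly increasing lists, dropping cross duplicates
def merge : List Nat → List Nat → List Nat
  | [], ys => ys
  | x :: xs, [] => x :: xs
  | x :: xs, y :: ys =>
    if x < y then x :: merge xs (y :: ys)
    else if y < x then y :: merge (x :: xs) ys
    else x :: merge xs ys
termination_by xs ys => xs.length + ys.length

def find_middles_alt (needle : String) (haystack : List String) (positive_rotation : Bool) : List (Int × Int) :=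
  let nd := needle.toList
  let other := nd.reverse          -- needle[::-1]
  let half : Int := ((nd.length / 2 : Nat) : Int)   -- len(needle) // 2
  (PySem.List.enumerate haystack 0).foldl (fun out il =>
    let i := il.1
    let l := il.2.toList
    let w : Int := (l.length : Int)
    let ps := merge (occFrom nd l 0) (occFrom other l 0)
    if positive_rotation then
      out ++ ps.map (fun p => (i - ((p : Int) + half), (p : Int) + half))
    else
      out ++ ps.map (fun p => (i - (w - ((p : Int) + half)) + 1, (p : Int) + half))) []

-- ===== PRECONDITION & SPEC =====
def Spec_find_middles (needle : String) (haystack : List String) (positive_rotation : Bool) (out : List (Int × Int)) : Prop := out = find_middles_alt needle haystack positive_rotation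
instance (needle : String) (haystack : List String) (positive_rotation : Bool) (out : List (Int × Int)) : Decidable (Spec_find_middles needle haystack positive_rotation out) := by unfold Spec_find_middles; infer_instance

-- ===== CLAIM (what is proved, stated in full; the proofs are below) =====
def Claim_equal_find_middles : Prop := ∀ (needle : String) (haystack : List String) (positive_rotation : Bool), Dom_find_middles needle haystack positive_rotation → Spec_find_middles needle haystack positive_rotation (find_middles needle haystack positive_rotation)

-- ===== LEMMAS AND PROOFS =====

-- occFrom lists exactly the match positions in [k, len), in increasing order
theorem occFrom_eq (pat line : List Char) (k : Nat) :
    occFrom pat line k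
      = (List.range' k (line.length - k)).filter (fun q => PySem.Chars.startswith (line.drop q) pat) := by
  induction k using occFrom.induct (pat := pat) (line := line) with
  | case1 k p h ih =>
    rw [occFrom]
    rw [dif_pos h]
    obtain ⟨hk, hp0, hplt⟩ := h
    have hs := PySem.Chars.findFrom_natCast_spec line pat k hk (by omega)
    set j := p.toNat with hj
    have hkj : k ≤ j := by omega
    have hPj : PySem.Chars.startswith (line.drop j) pat = true :=
      (PySem.Chars.startswith_iff _ _).mpr hs.2.1
    have hsplit : List.range' k (line.length - k)
        = List.range' k (j - k) ++ List.range' (k + (j - k)) ((line.length - k) - (j - k)) := by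
      rw [List.range'_append_1]
      congr 1
      omega
    rw [hsplit, List.filter_append]
    have h1 : (List.range' k (j - k)).filter
        (fun q => PySem.Chars.startswith (line.drop q) pat) = [] := by
      rw [List.filter_eq_nil_iff]
      intro q hq
      rw [List.mem_range'_1] at hq
      have : ¬ pat <+: line.drop q := hs.2.2 q hq.1 (by omega)
      simp [PySem.Chars.startswith_iff, this]
    have h2 : k + (j - k) = j := by omega
    have h3 : (line.length - k) - (j - k) = (line.length - j - 1) + 1 := by omega
    rw [h1, h2, h3, List.range'_succ, List.filter_cons, if_pos hPj, ih]
    simp only [List.nil_append, Nat.sub_sub]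
  | case2 k p h =>
    rw [occFrom]
    rw [dif_neg h]
    by_cases hk : k ≤ line.length
    · by_cases hinf : pat <:+: line.drop k
      · have hne : p ≠ -1 := by
          intro hcon
          exact ((PySem.Chars.findFrom_natCast_eq_neg_one_iff line pat k hk).mp hcon) hinf
        have hs := PySem.Chars.findFrom_natCast_spec line pat k hk hne
        have hp0 : (0 : Int) ≤ p := le_trans (by omega) hs.1
        have hge : ¬ p.toNat < line.length := by
          intro hlt; exact h ⟨hk, hp0, hlt⟩
        -- the match is past the end: only possible for pat = [] found at k = len
        have hpat : pat = [] := by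
          have := hs.2.1
          rwa [List.drop_eq_nil_of_le (by omega), List.prefix_nil] at this
        have hjk : p.toNat ≤ k := by
          by_contra hcon
          exact hs.2.2 k le_rfl (by omega) (by simp [hpat])
        have : k = line.length := by omega
        simp [this]
      · -- no occurrence at or after k: every position in [k, len) fails
        symm
        rw [List.filter_eq_nil_iff]
        intro q hq
        rw [List.mem_range'_1] at hq
        have : ¬ pat <+: line.drop q := by
          intro hpre
          apply hinf
          have hpre' : pat <+: (line.drop k).drop (q - k) := by
            rw [List.drop_drop]
            have h2 : k + (q - k) = q := by omega
            rwa [h2]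
          exact hpre'.isInfix.trans (List.drop_suffix _ _).isInfix
        simp [PySem.Chars.startswith_iff, this]
    · have : line.length - k = 0 := by omega
      simp [this]

theorem merge_cons_left (x : Nat) (xs ys : List Nat) (h : ∀ y ∈ ys, x < y) :
    merge (x :: xs) ys = x :: merge xs ys := by
  cases ys with
  | nil => cases xs <;> simp [merge]
  | cons y t => simp [merge, h y (by simp)]

theorem merge_cons_right (y : Nat) (xs ys : List Nat) (h : ∀ x ∈ xs, y < x) :
    merge xs (y :: ys) = y :: merge xs ys := by
  cases xs with
  | nil => simp [merge]
  | cons x t =>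
    have hy := h x (by simp)
    simp [merge, hy, Nat.not_lt.mpr (Nat.le_of_lt hy)]

-- merge of two filters of a strictly increasing list is the filter of the disjunction
theorem merge_filter (P Q : Nat → Bool) (xs : List Nat) (hx : xs.Pairwise (· < ·)) :
    merge (xs.filter P) (xs.filter Q) = xs.filter (fun q => P q || Q q) := by
  induction xs with
  | nil => simp [merge]
  | cons x t ih =>
    rw [List.pairwise_cons] at hx
    have ih' := ih hx.2
    have hmem : ∀ S : Nat → Bool, ∀ y ∈ t.filter S, x < y := by
      intro S y hy; exact hx.1 y (List.mem_of_mem_filter hy)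
    by_cases hP : P x = true <;> by_cases hQ : Q x = true <;>
      simp [hP, hQ]
    · simp only [merge, Nat.lt_irrefl, if_false]
      rw [ih']
    · rw [merge_cons_left x _ _ (hmem Q), ih']
    · rw [merge_cons_right x _ _ (hmem P), ih']
    · exact ih'

-- the merged occurrence lists are exactly A's per-position filter
theorem line_positions (nd other l : List Char) :
    merge (occFrom nd l 0) (occFrom other l 0)
      = (List.range l.length).filter (fun q => startswithAt l nd q || startswithAt l other q) := by
  have h0 : ∀ pat : List Char, occFrom pat l 0
      = (List.range l.length).filter (fun q => PySem.Chars.startswith (l.drop q) pat) := by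
    intro pat
    rw [occFrom_eq, Nat.sub_zero, ← List.range_eq_range']
  rw [h0, h0, merge_filter _ _ _ List.pairwise_lt_range]
  simp [startswithAt]

-- ===== VERDICT (by name: the statement is the Claim_ definition above) =====
theorem find_middles_spec : Claim_equal_find_middles := by
  intro needle haystack positive_rotation _
  unfold Spec_find_middles find_middles find_middles_alt
  simp only []
  cases positive_rotation
  · simp only [Bool.false_eq_true, if_false, PySem.List.foldl_append_if,
      PySem.List.foldl_append_eq_flatMap, List.nil_append]
    rw [PySem.List.enumerate_eq_map_pyRange (d := "")]
    simp only [PySem.List.pyRange_one, PySem.List.len_eq, Int.sub_zero, Int.toNat_natCast,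
      List.flatMap_map, zero_add, PySem.List.pyGetD_natCast]
    apply List.flatMap_congr ?_
    intro k _
    rw [← line_positions]
    simp only [List.bind_eq_flatMap, List.pure_def, ← List.map_eq_flatMap, List.map_map,
      Function.comp_def]
  · simp only [if_true, PySem.List.foldl_append_if,
      PySem.List.foldl_append_eq_flatMap, List.nil_append]
    rw [PySem.List.enumerate_eq_map_pyRange (d := "")]
    simp only [PySem.List.pyRange_one, PySem.List.len_eq, Int.sub_zero, Int.toNat_natCast,
      List.flatMap_map, zero_add, PySem.List.pyGetD_natCast]
    apply List.flatMap_congr ?_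
    intro k _
    rw [← line_positions]
    simp only [List.bind_eq_flatMap, List.pure_def, ← List.map_eq_flatMap, List.map_map,
      Function.comp_def]
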